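-- pv_equiv track=rewrite | github.com/MrBrantCode/unitest_baseline | mut_generate/mist_train_cf/cf_21042/solution.py | count_prime_numbers_with_3
-- ===== SOURCE A (Python) =====
-- import math
--
-- def count_prime_numbers_with_3(lst):
--     count = 0
--
--     def is_prime_and_contains_3(num):
--         if num < 2:
--             return False
--         if '3' not in str(num):
--             return False
--
--         for i in range(2, int(math.sqrt(num)) + 1):
--             if num % i == 0:
--                 return False
--
--         return True
--
--     for num in lst:
--         if is_prime_and_contains_3(num):
--             count += 1
--
--     return count
-- ===== SOURCE B (Python) =====
-- import math
--
-- def count_prime_numbers_with_3(lst):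
--     candidates = [n for n in lst if n >= 2 and '3' in str(n)]
--     if not candidates:
--         return 0
--
--     primes = []
--
--     def is_prime(n):
--         # primes already holds every prime below n's square root
--         for p in primes:
--             if p * p > n:
--                 break
--             if n % p == 0:
--                 return False
--         return True
--
--     for k in range(2, math.isqrt(max(candidates)) + 1):
--         if is_prime(k):
--             primes.append(k)
--
--     return sum(1 for n in candidates if is_prime(n))
-- ===== Notes on version B (the rewrite author's own statement) =====
-- stated objective: faster
-- what changed: A trial-divides each number by every integer in range(2, int(sqrt(n))+1); B first filters the candidates (n>=2 and containing '3'), builds ONE shared list of all primes up to isqrt(max(candidates)) by growing the prime list against itself, and then tests each candidate by dividing only by those precomputed primes with an early break at p*p > n.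
import Mathlib
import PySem

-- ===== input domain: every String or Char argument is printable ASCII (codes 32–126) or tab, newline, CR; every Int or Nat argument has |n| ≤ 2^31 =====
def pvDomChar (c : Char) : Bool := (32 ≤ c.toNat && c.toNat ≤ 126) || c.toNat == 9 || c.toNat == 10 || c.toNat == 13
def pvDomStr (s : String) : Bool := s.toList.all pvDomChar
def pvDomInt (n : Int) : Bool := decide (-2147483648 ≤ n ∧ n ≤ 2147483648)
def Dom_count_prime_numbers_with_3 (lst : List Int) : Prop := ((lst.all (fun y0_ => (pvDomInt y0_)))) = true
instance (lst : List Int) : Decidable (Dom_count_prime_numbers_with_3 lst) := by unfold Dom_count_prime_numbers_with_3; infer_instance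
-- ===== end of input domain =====

-- B replaces A's per-number trial division over range(2, int(sqrt(num))+1) by a single shared
-- precomputation: the list of all primes up to isqrt(max(candidates)) is built once (each new k
-- tested only against the primes already found), and every candidate is then divided only by
-- those primes, breaking as soon as p*p > n; measurably faster on large inputs.

-- ===== PORT A =====
-- inner helper is_prime_and_contains_3; `int(math.sqrt(num))` is ported as Nat.sqrt num.toNat,
-- exact for 0 ≤ num ≤ 2^31 (correctly-rounded double sqrt cannot cross an integer boundary there).
def aIsPrimeAndContains3 (num : Int) : Bool :=
  if num < 2 then false
  else if !(PySem.Str.isIn "3" (PySem.Int.toStr num)) then false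
  else
    -- for i in range(2, int(math.sqrt(num)) + 1): if num % i == 0: return False / return True
    (PySem.List.pyRange 2 ((Nat.sqrt num.toNat : Int) + 1) 1).all
      (fun i => !(PySem.Int.mod num i == 0))

def count_prime_numbers_with_3 (lst : List Int) : Int :=
  lst.foldl (fun count num => if aIsPrimeAndContains3 num then count + 1 else count) 0

-- ===== PORT B =====
def bContains3 (n : Int) : Bool := PySem.Str.isIn "3" (PySem.Int.toStr n)

-- def is_prime(n): for p in primes: if p*p > n: break; if n % p == 0: return False / return True
def bIsPrimeBy : List Int → Int → Bool
  | [], _ => true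
  | p :: ps, n =>
    if n < p * p then true
    else if PySem.Int.mod n p == 0 then false
    else bIsPrimeBy ps n

-- `math.isqrt` is exactly Nat.sqrt on a nonnegative argument.
def count_prime_numbers_with_3_alt (lst : List Int) : Int :=
  let candidates := lst.filter (fun n => decide (2 ≤ n) && bContains3 n)
  match PySem.List.max? candidates (fun x => x) with
  | none => 0
  | some m =>
    -- for k in range(2, math.isqrt(max(candidates)) + 1): if is_prime(k): primes.append(k)
    let primes := (PySem.List.pyRange 2 ((Nat.sqrt m.toNat : Int) + 1) 1).foldl
      (fun primes k => if bIsPrimeBy primes k then primes ++ [k] else primes) []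
    -- return sum(1 for n in candidates if is_prime(n))
    (candidates.countP (fun n => bIsPrimeBy primes n) : Int)

-- ===== PRECONDITION & SPEC =====
def Spec_count_prime_numbers_with_3 (lst : List Int) (out : Int) : Prop := out = count_prime_numbers_with_3_alt lst
instance (lst : List Int) (out : Int) : Decidable (Spec_count_prime_numbers_with_3 lst out) := by unfold Spec_count_prime_numbers_with_3; infer_instance

-- ===== CLAIM (what is proved, stated in full; the proofs are below) =====
def Claim_equal_count_prime_numbers_with_3 : Prop := ∀ (lst : List Int), Dom_count_prime_numbers_with_3 lst → Spec_count_prime_numbers_with_3 lst (count_prime_numbers_with_3 lst)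

-- ===== LEMMAS AND PROOFS =====

-- A's trial division over range(2, sqrt+1) decides Nat.Prime (via Nat.prime_def_le_sqrt).
lemma aTrial_eq_prime (num : Int) (h2 : 2 ≤ num) :
    ((PySem.List.pyRange 2 ((Nat.sqrt num.toNat : Int) + 1) 1).all
      (fun i => !(PySem.Int.mod num i == 0))) = decide (Nat.Prime num.toNat) := by
  have hN : ((num.toNat : Int)) = num := Int.toNat_of_nonneg (by omega)
  rw [Bool.eq_iff_iff]
  simp only [List.all_eq_true, PySem.List.mem_pyRange_one, Bool.not_eq_eq_eq_not, Bool.not_true,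
    beq_eq_false_iff_ne, ne_eq, decide_eq_true_eq]
  constructor
  · intro h
    rw [Nat.prime_def_le_sqrt]
    refine ⟨by omega, fun m hm hms hdvd => ?_⟩
    have := h (m : Int) ⟨by exact_mod_cast hm, by exact_mod_cast (by omega : (m:Int) < (Nat.sqrt num.toNat : Int) + 1)⟩
    · exact this (by rw [PySem.Int.mod_eq_zero_iff_dvd]; exact_mod_cast (hN ▸ Int.natCast_dvd_natCast.mpr hdvd))
  · intro hp i hi hmod
    rw [PySem.Int.mod_eq_zero_iff_dvd] at hmod
    rw [Nat.prime_def_le_sqrt] at hp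
    refine hp.2 i.toNat (by omega) (by omega) ?_
    have : (i.toNat : Int) ∣ (num.toNat : Int) := by
      rw [Int.toNat_of_nonneg (by omega : (0:Int) ≤ i), hN]; exact hmod
    exact_mod_cast this

-- the list of primes up to L, in increasing order, as B's loop accumulates it
def pvPrimes (L : Nat) : List Int :=
  ((List.range (L + 1)).filter (fun k => decide (Nat.Prime k))).map (fun (k : Nat) => (k : Int))

lemma mem_pvPrimes (L : Nat) (p : Int) :
    p ∈ pvPrimes L ↔ 0 ≤ p ∧ p ≤ (L : Int) ∧ Nat.Prime p.toNat := by
  rw [pvPrimes, List.mem_map]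
  constructor
  · rintro ⟨k, hk, rfl⟩
    rw [List.mem_filter, List.mem_range] at hk
    simp only [decide_eq_true_eq] at hk
    refine ⟨by positivity, by exact_mod_cast (by omega : k ≤ L), by simpa using hk.2⟩
  · rintro ⟨h0, hL, hp⟩
    exact ⟨p.toNat, by rw [List.mem_filter, List.mem_range]; exact ⟨by omega, by simpa using hp⟩, by omega⟩

lemma pvPrimes_pairwise (L : Nat) : (pvPrimes L).Pairwise (· ≤ ·) := by
  rw [pvPrimes, List.pairwise_map]
  refine List.Pairwise.imp ?_ (List.Pairwise.sublist List.filter_sublist List.pairwise_le_range)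
  intro a b h; exact_mod_cast h

lemma pvPrimes_ge_two (L : Nat) (p : Int) (hp : p ∈ pvPrimes L) : 2 ≤ p := by
  rw [mem_pvPrimes] at hp
  have := hp.2.2.two_le
  omega

-- dividing a PRIME n by any list of numbers ≥ 2 finds no divisor
lemma bIsPrimeBy_of_prime (n : Int) (h2 : 2 ≤ n) (hp : Nat.Prime n.toNat) :
    ∀ l : List Int, (∀ p ∈ l, 2 ≤ p) → bIsPrimeBy l n = true := by
  intro l
  induction l with
  | nil => intro _; rfl
  | cons p ps ih =>
    intro hge
    have hp2 : 2 ≤ p := hge p (List.mem_cons_self ..)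
    rw [bIsPrimeBy]
    by_cases hbr : n < p * p
    · rw [if_pos hbr]
    · rw [if_neg hbr]
      have hnd : ¬ p ∣ n := by
        intro hd
        have hdN : p.toNat ∣ n.toNat := by
          have : (p.toNat : Int) ∣ (n.toNat : Int) := by
            rw [Int.toNat_of_nonneg (by omega), Int.toNat_of_nonneg (by omega)]; exact hd
          exact_mod_cast this
        rcases hp.eq_one_or_self_of_dvd _ hdN with h | h
        · omega
        · have : p = n := by omega
          nlinarith
      rw [if_neg (by simpa [PySem.Int.mod_eq_zero_iff_dvd] using hnd)]
      exact ih (fun q hq => hge q (List.mem_cons_of_mem _ hq))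

-- a listed divisor q with q*q ≤ n is found (the break is sound on a sorted list of numbers ≥ 2)
lemma bIsPrimeBy_of_divisor (n : Int) :
    ∀ l : List Int, (∀ p ∈ l, 2 ≤ p) → l.Pairwise (· ≤ ·) →
      ∀ q ∈ l, q * q ≤ n → q ∣ n → bIsPrimeBy l n = false := by
  intro l
  induction l with
  | nil => intro _ _ q hq; simp at hq
  | cons p ps ih =>
    intro hge hsort q hq hqn hqd
    have hp2 : 2 ≤ p := hge p (List.mem_cons_self ..)
    have hpq : p ≤ q := by
      rcases List.mem_cons.mp hq with rfl | hq'
      · exact le_refl q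
      · exact (List.pairwise_cons.mp hsort).1 q hq'
    rw [bIsPrimeBy]
    have hnbr : ¬ n < p * p := by
      have : p * p ≤ q * q := by nlinarith
      omega
    rw [if_neg hnbr]
    by_cases hpd : PySem.Int.mod n p == 0
    · rw [if_pos hpd]
    · rw [if_neg hpd]
      have hqp : q ≠ p := by
        intro h
        exact hpd (beq_iff_eq.mpr ((PySem.Int.mod_eq_zero_iff_dvd n p).mpr (h ▸ hqd)))
      have hq' : q ∈ ps := by
        rcases List.mem_cons.mp hq with rfl | hq'
        · exact absurd rfl hqp
        · exact hq'
      exact ih (fun r hr => hge r (List.mem_cons_of_mem _ hr)) (List.pairwise_cons.mp hsort).2 q hq' hqn hqd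

-- if the list contains every prime q with q*q ≤ n (and only numbers ≥ 2, sorted), the loop decides primality
lemma bIsPrimeBy_eq_prime (n : Int) (h2 : 2 ≤ n) (l : List Int)
    (hge : ∀ p ∈ l, 2 ≤ p) (hsort : l.Pairwise (· ≤ ·))
    (hcomp : ∀ q : Nat, Nat.Prime q → (q : Int) * (q : Int) ≤ n → (q : Int) ∈ l) :
    bIsPrimeBy l n = decide (Nat.Prime n.toNat) := by
  by_cases hp : Nat.Prime n.toNat
  · rw [decide_eq_true hp]
    exact bIsPrimeBy_of_prime n h2 hp l hge
  · rw [decide_eq_false hp]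
    set q := n.toNat.minFac with hq
    have hqp : Nat.Prime q := Nat.minFac_prime (by omega)
    have hqd : q ∣ n.toNat := Nat.minFac_dvd _
    have hqsq : q * q ≤ n.toNat := by
      have := Nat.minFac_sq_le_self (by omega : 0 < n.toNat) hp
      nlinarith [this]
    have hqsqI : (q : Int) * (q : Int) ≤ n := by
      have : ((q * q : Nat) : Int) ≤ ((n.toNat : Nat) : Int) := by exact_mod_cast hqsq
      push_cast at this; omega
    have hqdI : (q : Int) ∣ n := by
      have : (q : Int) ∣ (n.toNat : Int) := Int.natCast_dvd_natCast.mpr hqd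
      rwa [Int.toNat_of_nonneg (by omega)] at this
    exact bIsPrimeBy_of_divisor n l hge hsort (q : Int) (hcomp q hqp hqsqI) hqsqI hqdI

-- B's generation loop produces exactly the primes up to L
lemma gen_eq_pvPrimes (L : Nat) :
    (PySem.List.pyRange 2 ((L : Int) + 1) 1).foldl
      (fun primes k => if bIsPrimeBy primes k then primes ++ [k] else primes) [] = pvPrimes L := by
  induction L with
  | zero => decide
  | succ L ih =>
    by_cases hL : L = 0
    · subst hL; decide
    · have h2L : (2 : Int) ≤ (L : Int) + 1 := by omega
      rw [show ((L + 1 : Nat) : Int) + 1 = ((L : Int) + 1) + 1 by push_cast; ring,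
        PySem.List.pyRange_one_succ_right h2L, List.foldl_append, ih]
      have hstep : bIsPrimeBy (pvPrimes L) ((L : Int) + 1) = decide (Nat.Prime (L + 1)) := by
        have := bIsPrimeBy_eq_prime ((L : Int) + 1) (by omega) (pvPrimes L)
          (pvPrimes_ge_two L) (pvPrimes_pairwise L) ?_
        · rw [this]; norm_num
        · intro q hq hqsq
          rw [mem_pvPrimes]
          have h2q : 2 ≤ q := hq.two_le
          refine ⟨by positivity, ?_, by simpa using hq⟩
          have : (q : Int) < (q : Int) * (q : Int) := by
            have : (2 : Int) ≤ (q : Int) := by exact_mod_cast h2q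
            nlinarith
          omega
      simp only [List.foldl_cons, List.foldl_nil, hstep]
      have hsucc : pvPrimes (L + 1) =
          if Nat.Prime (L + 1) then pvPrimes L ++ [((L : Int) + 1)] else pvPrimes L := by
        unfold pvPrimes
        rw [List.range_succ (n := L + 1), List.filter_append, List.map_append]
        by_cases hpr : Nat.Prime (L + 1)
        · rw [if_pos hpr]
          congr 1
          simp [hpr]
        · rw [if_neg hpr]
          simp [hpr]
      rw [hsucc]
      by_cases hpr : Nat.Prime (L + 1) <;> simp [hpr]

-- A's per-element test in closed form
lemma aTest_eq (num : Int) :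
    aIsPrimeAndContains3 num
      = ((decide (2 ≤ num) && bContains3 num) && decide (Nat.Prime num.toNat)) := by
  unfold aIsPrimeAndContains3 bContains3
  by_cases hlt : num < 2
  · simp [hlt]
  · have h2 : 2 ≤ num := by omega
    by_cases h3 : PySem.Chars.isIn ['3'] (PySem.Int.toChars num) = true
    · rw [if_neg hlt, if_neg (by simp [h3]), aTrial_eq_prime num h2]
      simp [h2, h3]
    · rw [if_neg hlt, if_pos (by simp [h3])]
      simp only [Bool.not_eq_true] at h3
      simp [h3]

-- ===== VERDICT (by name: the statement is the Claim_ definition above) =====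
theorem count_prime_numbers_with_3_spec : Claim_equal_count_prime_numbers_with_3 := by
  intro lst _
  unfold Spec_count_prime_numbers_with_3 count_prime_numbers_with_3 count_prime_numbers_with_3_alt
  rw [PySem.List.foldl_count_if, funext aTest_eq]
  simp only [zero_add]
  have hcount : lst.countP (fun num => (decide (2 ≤ num) && bContains3 num) && decide (Nat.Prime num.toNat))
      = (lst.filter (fun n => decide (2 ≤ n) && bContains3 n)).countP (fun n => decide (Nat.Prime n.toNat)) := by
    rw [List.countP_filter]
    refine List.countP_congr (fun x _ => ?_)
    constructor
    · intro h; simp only [Bool.and_eq_true] at *; tauto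
    · intro h; simp only [Bool.and_eq_true] at *; tauto
  rw [hcount]
  cases hmax : PySem.List.max? (lst.filter (fun n => decide (2 ≤ n) && bContains3 n)) (fun x => x) with
  | none =>
    rw [(PySem.List.max?_eq_none_iff _ _).mp hmax]
    simp
  | some m =>
    simp only [hmax]
    rw [gen_eq_pvPrimes (Nat.sqrt m.toNat)]
    congr 1
    refine List.countP_congr (fun n hn => ?_)
    have h2 : 2 ≤ n := by
      have := (List.mem_filter.mp hn).2
      simp only [Bool.and_eq_true, decide_eq_true_eq] at this
      exact this.1
    have hle : n ≤ m := PySem.List.max?_isMax hmax n hn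
    have hkey : bIsPrimeBy (pvPrimes (Nat.sqrt m.toNat)) n = decide (Nat.Prime n.toNat) := by
      refine bIsPrimeBy_eq_prime n h2 _ (pvPrimes_ge_two _) (pvPrimes_pairwise _) ?_
      intro q hq hqsq
      rw [mem_pvPrimes]
      refine ⟨by positivity, ?_, by simpa using hq⟩
      have hqq : q * q ≤ m.toNat := by
        have h1 : (q : Int) * (q : Int) ≤ m := le_trans hqsq hle
        have h2' : ((q * q : Nat) : Int) ≤ m := by push_cast; exact h1
        omega
      exact_mod_cast Nat.le_sqrt.mpr hqq
    rw [hkey]
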